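-- pv_equiv track=rewrite | github.com/blakej2432/Algorithm-study | 프로그래머스/해시/42840.py | solution
-- ===== SOURCE A (Python) =====
-- def solution(answers):
--     answer = []
--
--     pattern_1 = [1, 2, 3, 4, 5]
--     pattern_2 = [2, 1, 2, 3, 2, 4, 2, 5]
--     pattern_3 = [3, 3, 1, 1, 2, 2, 4, 4, 5, 5]
--
--     len_1 = len(pattern_1)
--     len_2 = len(pattern_2)
--     len_3 = len(pattern_3)
--
--     score_1 = 0
--     score_2 = 0
--     score_3 = 0
--
--     for i in range(len(answers)):
--         num_1 = i % len_1
--         num_2 = i % len_2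
--         num_3 = i % len_3
--
--         if answers[i] == pattern_1[num_1]:
--             score_1 += 1
--         if answers[i] == pattern_2[num_2]:
--             score_2 += 1
--         if answers[i] == pattern_3[num_3]:
--             score_3 += 1
--
--     scores = [score_1, score_2, score_3]
--
--     max_score = max(scores)
--
--     for idx, score in enumerate(scores):
--         if score == max_score:
--             answer.append(idx + 1)
--
--     return answer
-- ===== SOURCE B (Python) =====
-- def solution(answers):
--     # One pass builds a histogram keyed by (position mod 40, answer); 40 = lcm of the
--     # pattern lengths, so each score is then read off from at most 40 buckets with no
--     # further scan of answers.
--     cnt = {}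
--     for i, a in enumerate(answers):
--         key = (i % 40, a)
--         cnt[key] = cnt.get(key, 0) + 1
--     patterns = [[1, 2, 3, 4, 5],
--                 [2, 1, 2, 3, 2, 4, 2, 5],
--                 [3, 3, 1, 1, 2, 2, 4, 4, 5, 5]]
--     scores = [sum(cnt.get((r, p[r % len(p)]), 0) for r in range(40)) for p in patterns]
--     m = max(scores)
--     return [i + 1 for i, s in enumerate(scores) if s == m]
-- ===== Notes on version B (the rewrite author's own statement) =====
-- stated objective: alternative
-- what changed: A compares every answer against all three patterns while keeping three running counters; B makes one pass that only builds a histogram keyed by (index mod 40, answer) -- 40 = lcm of the pattern lengths -- and then computes each score from at most 40 histogram buckets without re-scanning answers.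
import Mathlib
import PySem

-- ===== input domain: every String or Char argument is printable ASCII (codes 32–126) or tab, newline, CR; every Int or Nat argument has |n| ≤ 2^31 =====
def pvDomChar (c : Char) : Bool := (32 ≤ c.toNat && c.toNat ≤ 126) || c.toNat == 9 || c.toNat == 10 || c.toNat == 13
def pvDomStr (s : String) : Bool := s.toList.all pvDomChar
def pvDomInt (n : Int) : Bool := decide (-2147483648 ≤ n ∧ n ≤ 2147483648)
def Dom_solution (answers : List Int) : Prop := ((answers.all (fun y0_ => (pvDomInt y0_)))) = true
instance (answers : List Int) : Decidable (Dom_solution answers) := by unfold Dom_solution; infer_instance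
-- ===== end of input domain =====

-- B replaces A's three running counters (one comparison against every pattern per
-- element) by a single pass that only builds a histogram keyed by (index mod 40,
-- answer) — 40 = lcm of the pattern lengths — and then reads each score off at most
-- 40 histogram buckets without re-scanning answers (alternative algorithm, same cost).

-- ===== PORT A =====
def solution (answers : List Int) : List Int :=
  let pattern1 : List Int := [1, 2, 3, 4, 5]
  let pattern2 : List Int := [2, 1, 2, 3, 2, 4, 2, 5]
  let pattern3 : List Int := [3, 3, 1, 1, 2, 2, 4, 4, 5, 5]
  let len1 : Int := PySem.List.len pattern1
  let len2 : Int := PySem.List.len pattern2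
  let len3 : Int := PySem.List.len pattern3
  -- for i in range(len(answers)): three independent 'if …: score_k += 1' updates
  let st := (PySem.List.pyRange 0 (PySem.List.len answers)).foldl
    (fun (s : Int × Int × Int) i =>
      (if PySem.List.pyGetD answers i 0 = PySem.List.pyGetD pattern1 (PySem.Int.mod i len1) 0 then s.1 + 1 else s.1,
       if PySem.List.pyGetD answers i 0 = PySem.List.pyGetD pattern2 (PySem.Int.mod i len2) 0 then s.2.1 + 1 else s.2.1,
       if PySem.List.pyGetD answers i 0 = PySem.List.pyGetD pattern3 (PySem.Int.mod i len3) 0 then s.2.2 + 1 else s.2.2))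
    (0, 0, 0)
  let scores : List Int := [st.1, st.2.1, st.2.2]
  let maxScore : Int := ((PySem.List.max? scores (fun y => y)).getD 0)
  -- for idx, score in enumerate(scores): if score == max_score: answer.append(idx + 1)
  (PySem.List.enumerate scores).foldl
    (fun acc p => if p.2 == maxScore then acc ++ [p.1 + 1] else acc) []

-- ===== PORT B =====
def solution_alt (answers : List Int) : List Int :=
  -- for i, a in enumerate(answers): key = (i % 40, a); cnt[key] = cnt.get(key, 0) + 1
  let cnt : PySem.Dict (Int × Int) Int :=
    ((PySem.List.enumerate answers).map (fun ia => (PySem.Int.mod ia.1 40, ia.2))).foldl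
      (fun d k => d.insert k (d.getD k 0 + 1)) PySem.Dict.empty
  let patterns : List (List Int) :=
    [[1, 2, 3, 4, 5], [2, 1, 2, 3, 2, 4, 2, 5], [3, 3, 1, 1, 2, 2, 4, 4, 5, 5]]
  -- scores = [sum(cnt.get((r, p[r % len(p)]), 0) for r in range(40)) for p in patterns]
  let scores : List Int := patterns.map (fun p =>
    ((PySem.List.pyRange 0 40).map
      (fun r => cnt.getD (r, PySem.List.pyGetD p (PySem.Int.mod r (PySem.List.len p)) 0) 0)).sum)
  let m : Int := (PySem.List.max? scores (fun y => y)).getD 0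
  -- [i + 1 for i, s in enumerate(scores) if s == m]
  ((PySem.List.enumerate scores).filter (fun p => p.2 == m)).map (fun p => p.1 + 1)

-- ===== PRECONDITION & SPEC =====
def Spec_solution (answers : List Int) (out : List Int) : Prop := out = solution_alt answers
instance (answers : List Int) (out : List Int) : Decidable (Spec_solution answers out) := by unfold Spec_solution; infer_instance

-- ===== CLAIM (what is proved, stated in full; the proofs are below) =====
def Claim_equal_solution : Prop := ∀ (answers : List Int), Dom_solution answers → Spec_solution answers (solution answers)

-- ===== LEMMAS AND PROOFS =====

-- A's triple-counter fold over a list of indices equals the three per-predicate 0/1-sums.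
theorem pv_fold3 (q1 q2 q3 : Int → Prop) [DecidablePred q1] [DecidablePred q2] [DecidablePred q3] :
    ∀ (l : List Int) (a b c : Int),
      l.foldl (fun (s : Int × Int × Int) i =>
        (if q1 i then s.1 + 1 else s.1,
         if q2 i then s.2.1 + 1 else s.2.1,
         if q3 i then s.2.2 + 1 else s.2.2)) (a, b, c)
      = (a + (l.map (fun i => if q1 i then (1 : Int) else 0)).sum,
         b + (l.map (fun i => if q2 i then (1 : Int) else 0)).sum,
         c + (l.map (fun i => if q3 i then (1 : Int) else 0)).sum) := by
  intro l
  induction l with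
  | nil => intro a b c; simp
  | cons x t ih =>
    intro a b c
    simp only [List.foldl_cons, List.map_cons, List.sum_cons, ih]
    split_ifs <;> refine Prod.ext ?_ (Prod.ext ?_ ?_) <;> simp <;> ring

-- Over a duplicate-free list of first components, at most one key (r, g r) equals x.
theorem pv_sum_ite_key (R : List Int) (hR : R.Nodup) (g : Int → Int) (x : Int × Int) :
    (R.map (fun r => if x = (r, g r) then (1 : Int) else 0)).sum
      = if x.1 ∈ R ∧ x.2 = g x.1 then 1 else 0 := by
  induction R with
  | nil => simp
  | cons r R' ih =>
    have hR' : R'.Nodup := hR.of_cons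
    have hrR' : r ∉ R' := by simp_all [List.nodup_cons]
    simp only [List.map_cons, List.sum_cons, ih hR', List.mem_cons]
    by_cases hx : x = (r, g r)
    · subst hx
      simp [hrR']
    · have : ¬ (x.1 = r ∧ x.2 = g x.1) := by
        rintro ⟨h1, h2⟩
        exact hx (Prod.ext h1 (by rw [h2, h1]))
      simp only [if_neg hx, zero_add]
      by_cases hmem : x.1 ∈ R' ∧ x.2 = g x.1
      · simp [hmem]
      · have : ¬ ((x.1 = r ∨ x.1 ∈ R') ∧ x.2 = g x.1) := by tauto
        simp [hmem, this]

-- Summing the histogram counts over the distinct keys (r, g r) = summing indicators.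
theorem pv_sum_count (R : List Int) (hR : R.Nodup) (g : Int → Int) :
    ∀ (l : List (Int × Int)),
      (R.map (fun r => ((l.count (r, g r) : Nat) : Int))).sum
        = (l.map (fun x => if x.1 ∈ R ∧ x.2 = g x.1 then (1 : Int) else 0)).sum := by
  intro l
  induction l with
  | nil => simp
  | cons x t ih =>
    simp only [List.map_cons, List.sum_cons]
    have hmap : R.map (fun r => (((x :: t).count (r, g r) : Nat) : Int))
        = R.map (fun r => ((t.count (r, g r) : Nat) : Int) + (if x = (r, g r) then (1 : Int) else 0)) := by
      refine List.map_congr_left (fun r _ => ?_)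
      rw [List.count_cons]
      by_cases h : x = (r, g r)
      · simp [h]
      ·         simp
    rw [hmap, PySem.List.sum_map_add_int, ih, pv_sum_ite_key R hR g x]
    ring

-- Reading the (i % 40, answer) histogram at the 40 keys of a pattern whose length
-- divides 40 gives exactly A's per-pattern match count.
theorem pv_score (answers p : List Int)
    (hdvd : PySem.List.len p ∣ 40) (hpos : 0 < PySem.List.len p) :
    ((PySem.List.pyRange 0 40).map (fun r =>
        (((((PySem.List.pyRange 0 (PySem.List.len answers)).map (fun i => (PySem.Int.mod i 40, PySem.List.pyGetD answers i 0))).count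
            (r, PySem.List.pyGetD p (PySem.Int.mod r (PySem.List.len p)) 0)) : Nat) : Int))).sum
      = ((PySem.List.pyRange 0 (PySem.List.len answers)).map (fun i =>
          if PySem.List.pyGetD answers i 0 = PySem.List.pyGetD p (PySem.Int.mod i (PySem.List.len p)) 0
          then (1 : Int) else 0)).sum := by
  have hR : (PySem.List.pyRange 0 40).Nodup := by decide
  rw [pv_sum_count (PySem.List.pyRange 0 40) hR
        (fun r => PySem.List.pyGetD p (PySem.Int.mod r (PySem.List.len p)) 0)]
  rw [List.map_map]
  refine congrArg List.sum (List.map_congr_left (fun i hi => ?_))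
  have hi0 : 0 ≤ i := (PySem.List.mem_pyRange_one.mp hi).1
  have h40 : (0 : Int) < 40 := by norm_num
  have hmem : PySem.Int.mod i 40 ∈ PySem.List.pyRange 0 40 :=
    PySem.List.mem_pyRange_one.mpr ⟨PySem.Int.mod_nonneg i h40, PySem.Int.mod_lt i h40⟩
  have hmm : PySem.Int.mod (PySem.Int.mod i 40) (PySem.List.len p) = PySem.Int.mod i (PySem.List.len p) := by
    rw [PySem.Int.mod_eq_emod_of_pos h40, PySem.Int.mod_eq_emod_of_pos hpos,
        PySem.Int.mod_eq_emod_of_pos hpos]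
    exact Int.emod_emod_of_dvd i hdvd
  simp only [Function.comp_def, hmem, hmm, true_and]

-- ===== VERDICT (by name: the statement is the Claim_ definition above) =====
theorem solution_spec : Claim_equal_solution := by
  intro answers _
  show solution answers = solution_alt answers
  unfold solution solution_alt
  simp only [List.map_cons, List.map_nil]
  rw [PySem.List.enumerate_eq_map_pyRange answers 0]
  simp only [List.map_map, Function.comp_def]
  rw [pv_fold3]
  simp only [zero_add]
  rw [PySem.List.foldl_append_if]
  simp only [PySem.Dict.getD_foldl_insert_add_one, PySem.Dict.getD_empty, zero_add]
  rw [pv_score answers [1, 2, 3, 4, 5] (by decide) (by decide),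
      pv_score answers [2, 1, 2, 3, 2, 4, 2, 5] (by decide) (by decide),
      pv_score answers [3, 3, 1, 1, 2, 2, 4, 4, 5, 5] (by decide) (by decide)]
  simp [PySem.List.len]
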